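-- pv_equiv track=rewrite | github.com/pypi-data/pypi-mirror-290 | packages/rst-fast-parse/rst_fast_parse-0.0.12-py3-none-any.whl/rst_fast_parse/_opqrstu/rrrrrrrr.py | gAAAAABmuydMPtls5CUMo4erY_jQ1TheJVFpl8HAqeRri9_rhhWIJrda9Yub4Uvd5f_gKwEQ6IEM95TCD8LOzlPvMlhxft3lIw__
-- ===== SOURCE A (Python) =====
-- from typing import NewType
--
-- EscapedStr = NewType('EscapedStr', str)
--
-- def gAAAAABmuydMPtls5CUMo4erY_jQ1TheJVFpl8HAqeRri9_rhhWIJrda9Yub4Uvd5f_gKwEQ6IEM95TCD8LOzlPvMlhxft3lIw__(text: str) -> EscapedStr: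
--     parts = []
--     start = 0
--     while True:
--         found = text.find('\\', start)
--         if found == -1:
--             parts.append(text[start:])
--             return EscapedStr(''.join(parts))
--         parts.append(text[start:found])
--         parts.append('\x00' + text[found + 1:found + 2])
--         start = found + 2
-- ===== SOURCE B (Python) =====
-- from typing import NewType
--
-- EscapedStr = NewType('EscapedStr', str)
--
-- def gAAAAABmuydMPtls5CUMo4erY_jQ1TheJVFpl8HAqeRri9_rhhWIJrda9Yub4Uvd5f_gKwEQ6IEM95TCD8LOzlPvMlhxft3lIw__(text: str) -> EscapedStr:
--     out = []
--     chars = iter(text)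
--     for ch in chars:
--         if ch == '\\':
--             out.append('\x00' + next(chars, ''))
--         else:
--             out.append(ch)
--     return EscapedStr(''.join(out))
-- ===== Notes on version B (the rewrite author's own statement) =====
-- stated objective: simpler
-- what changed: Replaces the repeated str.find/slice chunk-building loop with a single character-by-character pass over an iterator that emits '\x00'+next-char on each backslash.
import Mathlib
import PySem

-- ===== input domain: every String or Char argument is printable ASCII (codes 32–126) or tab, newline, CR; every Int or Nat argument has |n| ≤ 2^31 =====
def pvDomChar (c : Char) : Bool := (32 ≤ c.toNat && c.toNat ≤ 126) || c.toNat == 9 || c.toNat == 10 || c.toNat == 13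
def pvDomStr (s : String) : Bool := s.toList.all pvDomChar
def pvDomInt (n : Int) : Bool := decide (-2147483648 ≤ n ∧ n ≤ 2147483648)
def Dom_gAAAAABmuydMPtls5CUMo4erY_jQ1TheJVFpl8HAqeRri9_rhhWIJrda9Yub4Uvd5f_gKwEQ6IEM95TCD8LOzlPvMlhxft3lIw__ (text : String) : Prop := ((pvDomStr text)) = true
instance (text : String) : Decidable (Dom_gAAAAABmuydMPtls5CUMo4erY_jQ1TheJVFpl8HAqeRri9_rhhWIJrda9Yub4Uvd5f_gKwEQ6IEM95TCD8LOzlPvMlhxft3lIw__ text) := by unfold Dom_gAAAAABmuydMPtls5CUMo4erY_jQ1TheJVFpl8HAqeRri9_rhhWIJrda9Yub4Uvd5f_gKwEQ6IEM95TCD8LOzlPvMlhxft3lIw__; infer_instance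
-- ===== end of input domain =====

-- B replaces A's repeated str.find/slice chunk-building loop with a single character-by-character
-- pass (simpler); the two are proved to return the same string on every input.


-- ===== PORT A =====
-- termination fact for A's loop: a find started past the end returns -1
theorem findFrom_big (text sub : List Char) (start : Nat) (h : text.length < start) :
    PySem.Chars.findFrom text sub (start : Int) = -1 := by
  simp only [PySem.Chars.findFrom]
  have h1 : ¬ ((start : Int) < 0) := by omega
  have h2 : (text.length : Int) < (start : Int) := by exact_mod_cast h
  simp [h1, h2]

-- A's while-loop: 'found = text.find("\\", start)'; on a hit append text[start:found] and
-- '\x00' + text[found+1:found+2] and continue from found+2, else append text[start:] and join.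
def escGoA (text : List Char) (start : Nat) (parts : List (List Char)) : List (List Char) :=
  let found := PySem.Chars.findFrom text ['\\'] (start : Int)
  if found = -1 then
    parts ++ [PySem.List.slice text (some (start : Int)) none]
  else
    escGoA text (found.toNat + 2)
      (parts ++ [PySem.List.slice text (some (start : Int)) (some found),
                 '\x00' :: PySem.List.slice text (some (found + 1)) (some (found + 2))])
termination_by text.length + 2 - start
decreasing_by
  rename_i hne
  have hle : start ≤ text.length := by
    by_contra hgt
    exact hne (findFrom_big text ['\\'] start (Nat.lt_of_not_le hgt))
  obtain ⟨hfs, ⟨t, ht⟩, -⟩ := PySem.Chars.findFrom_natCast_spec text ['\\'] start hle hne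
  have hlen := congrArg List.length ht
  simp [List.length_drop] at hlen
  omega

def gAAAAABmuydMPtls5CUMo4erY_jQ1TheJVFpl8HAqeRri9_rhhWIJrda9Yub4Uvd5f_gKwEQ6IEM95TCD8LOzlPvMlhxft3lIw__ (text : String) : String :=
  String.mk (PySem.Chars.join [] (escGoA text.toList 0 []))

-- ===== PORT B =====
-- B's for-loop over an iterator: a backslash consumes the next char ('' at the end) and
-- emits '\x00' + it; any other char is emitted unchanged.
def escGoB : List Char → List Char
  | [] => []
  | c :: rest =>
    if c = '\\' then
      match rest with
      | [] => ['\x00']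
      | d :: rs => '\x00' :: d :: escGoB rs
    else c :: escGoB rest

def gAAAAABmuydMPtls5CUMo4erY_jQ1TheJVFpl8HAqeRri9_rhhWIJrda9Yub4Uvd5f_gKwEQ6IEM95TCD8LOzlPvMlhxft3lIw___alt (text : String) : String :=
  String.mk (escGoB text.toList)

-- ===== PRECONDITION & SPEC =====
def Spec_gAAAAABmuydMPtls5CUMo4erY_jQ1TheJVFpl8HAqeRri9_rhhWIJrda9Yub4Uvd5f_gKwEQ6IEM95TCD8LOzlPvMlhxft3lIw__ (text : String) (out : String) : Prop := out = gAAAAABmuydMPtls5CUMo4erY_jQ1TheJVFpl8HAqeRri9_rhhWIJrda9Yub4Uvd5f_gKwEQ6IEM95TCD8LOzlPvMlhxft3lIw___alt text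
instance (text : String) (out : String) : Decidable (Spec_gAAAAABmuydMPtls5CUMo4erY_jQ1TheJVFpl8HAqeRri9_rhhWIJrda9Yub4Uvd5f_gKwEQ6IEM95TCD8LOzlPvMlhxft3lIw__ text out) := by unfold Spec_gAAAAABmuydMPtls5CUMo4erY_jQ1TheJVFpl8HAqeRri9_rhhWIJrda9Yub4Uvd5f_gKwEQ6IEM95TCD8LOzlPvMlhxft3lIw__; infer_instance

-- ===== CLAIM (what is proved, stated in full; the proofs are below) =====
def Claim_equal_gAAAAABmuydMPtls5CUMo4erY_jQ1TheJVFpl8HAqeRri9_rhhWIJrda9Yub4Uvd5f_gKwEQ6IEM95TCD8LOzlPvMlhxft3lIw__ : Prop := ∀ (text : String), Dom_gAAAAABmuydMPtls5CUMo4erY_jQ1TheJVFpl8HAqeRri9_rhhWIJrda9Yub4Uvd5f_gKwEQ6IEM95TCD8LOzlPvMlhxft3lIw__ text → Spec_gAAAAABmuydMPtls5CUMo4erY_jQ1TheJVFpl8HAqeRri9_rhhWIJrda9Yub4Uvd5f_gKwEQ6IEM95TCD8LOzlPvMlhxft3lIw__ text (gAAAAABmuydMPtls5CUMo4erY_jQ1TheJVFpl8HAqeRri9_rhhWIJrda9Yub4Uvd5f_gKwEQ6IEM95TCD8LOzlPvMlhxft3lIw__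 text)

-- ===== LEMMAS AND PROOFS =====

theorem join_nil_flatten (xss : List (List Char)) : PySem.Chars.join [] xss = xss.flatten := by
  induction xss with
  | nil => rfl
  | cons x xs ih =>
    cases xs with
    | nil => simp [PySem.Chars.join, List.intercalate, List.intersperse]
    | cons y ys =>
      simp only [PySem.Chars.join, List.intercalate, List.intersperse, List.flatten_cons] at *
      rw [← ih]
      simp

theorem escGoB_cons (c : Char) (rest : List Char) :
    escGoB (c :: rest) =
      if c = '\\' then
        (match rest with
         | [] => ['\x00']
         | d :: rs => '\x00' :: d :: escGoB rs)
      else c :: escGoB rest := by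
  cases rest <;> simp [escGoB]

theorem escGoB_no_backslash (xs : List Char) (h : ∀ c ∈ xs, c ≠ '\\') :
    escGoB xs = xs := by
  induction xs with
  | nil => rfl
  | cons c rest ih =>
    have hc : c ≠ '\\' := h c (by simp)
    rw [escGoB_cons, if_neg hc, ih (fun d hd => h d (by simp [hd]))]

theorem escGoB_split (xs ys : List Char) (h : ∀ c ∈ xs, c ≠ '\\') :
    escGoB (xs ++ '\\' :: ys) =
      xs ++ '\x00' :: (match ys with
        | [] => []
        | d :: rs => d :: escGoB rs) := by
  induction xs with
  | nil => cases ys <;> simp [escGoB]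
  | cons c rest ih =>
    have hc : c ≠ '\\' := h c (by simp)
    rw [List.cons_append, escGoB_cons, if_neg hc,
        ih (fun d hd => h d (by simp [hd]))]
    simp

theorem escGoA_spec (text : List Char) (start : Nat) (parts : List (List Char)) :
    (escGoA text start parts).flatten = parts.flatten ++ escGoB (text.drop start) := by
  by_cases hle : start ≤ text.length
  · by_cases hf : PySem.Chars.findFrom text ['\\'] (start : Int) = -1
    · -- no backslash from start on
      rw [escGoA]
      simp only [hf, if_pos]
      have hnb : ¬ ['\\'] <:+: text.drop start :=
        (PySem.Chars.findFrom_natCast_eq_neg_one_iff text ['\\'] start hle).mp hf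
      have hnone : ∀ c ∈ text.drop start, c ≠ '\\' := by
        intro c hc hcb
        exact hnb ((List.singleton_infix_iff '\\' _).mpr (hcb ▸ hc))
      rw [escGoB_no_backslash _ hnone]
      simp [PySem.List.slice_from_natCast]
    · -- a backslash at index f = found.toNat
      obtain ⟨hfs, hpre, hmin⟩ := PySem.Chars.findFrom_natCast_spec text ['\\'] start hle hf
      set fI := PySem.Chars.findFrom text ['\\'] (start : Int) with hfI
      set f := fI.toNat with hfdef
      have hfI_eq : fI = (f : Int) := by omega
      have hflt : f < text.length := by
        obtain ⟨t, ht⟩ := hpre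
        have hlen := congrArg List.length ht
        simp [List.length_drop] at hlen
        omega
      have hstf : start ≤ f := by omega
      have hgetf : text.drop f = '\\' :: text.drop (f + 1) := by
        obtain ⟨t, ht⟩ := hpre
        have ht2 : text.drop f = '\\' :: t := by simpa using ht.symm
        have htail : t = text.drop (f + 1) := by
          have h1 := congrArg (List.drop 1) ht2
          simpa [List.drop_drop, Nat.add_comm] using h1.symm
        rw [ht2, htail]
      have hmid : ∀ c ∈ (text.drop start).take (f - start), c ≠ '\\' := by
        intro c hc hcb
        obtain ⟨i, hi, hci⟩ := List.getElem_of_mem hc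
        have hitk : i < f - start := by
          have hl := hi
          rw [List.length_take] at hl
          omega
        have hci' : text[start + i]'(by omega) = '\\' := by
          rw [List.getElem_take, List.getElem_drop] at hci
          exact hci.trans hcb
        apply hmin (start + i) (by omega) (by omega)
        rw [List.drop_eq_getElem_cons (by omega : start + i < text.length), hci']
        exact ⟨text.drop (start + i + 1), rfl⟩
      have hsplit : text.drop start = (text.drop start).take (f - start) ++ '\\' :: text.drop (f + 1) := by
        conv_lhs => rw [← List.take_append_drop (f - start) (text.drop start)]
        rw [List.drop_drop]
        have hfs' : start + (f - start) = f := by omega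
        rw [hfs', hgetf]
      rw [escGoA]
      simp only [← hfI, hf, ite_false]
      rw [escGoA_spec text (fI.toNat + 2) _]
      have hslice1 : PySem.List.slice text (some (start : Int)) (some fI) = (text.drop start).take (f - start) := by
        rw [hfI_eq, PySem.List.slice_natCast]
      have hslice2 : PySem.List.slice text (some (fI + 1)) (some (fI + 2)) = (text.drop (f + 1)).take 1 := by
        rw [hfI_eq]
        have h1 : (f : Int) + 1 = ((f + 1 : Nat) : Int) := by push_cast; ring
        have h2 : (f : Int) + 2 = ((f + 2 : Nat) : Int) := by push_cast; ring
        rw [h1, h2, PySem.List.slice_natCast]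
        congr 1
        omega
      rw [hslice1, hslice2]
      have htoNat : fI.toNat + 2 = f + 2 := by omega
      rw [htoNat]
      conv_rhs => rw [hsplit]
      rw [escGoB_split _ _ hmid]
      cases hys : text.drop (f + 1) with
      | nil =>
        have hd2 : text.drop (f + 2) = [] := by
          have h1 := congrArg (List.drop 1) hys
          rw [List.drop_drop] at h1
          simpa [show f + 1 + 1 = f + 2 from by omega] using h1
        simp [hd2, escGoB]
      | cons d rs =>
        have hd2 : text.drop (f + 2) = rs := by
          have h1 := congrArg (List.drop 1) hys
          rw [List.drop_drop] at h1
          simpa [show f + 1 + 1 = f + 2 from by omega] using h1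
        simp [hd2]
  · -- start past the end: find returns -1, both sides append nothing
    rw [escGoA]
    have hf : PySem.Chars.findFrom text ['\\'] (start : Int) = -1 :=
      findFrom_big text ['\\'] start (Nat.lt_of_not_le hle)
    simp only [hf, if_pos]
    have hdrop : text.drop start = [] := List.drop_eq_nil_of_le (by omega)
    rw [PySem.List.slice_from_natCast, hdrop]
    simp [escGoB]
termination_by text.length + 2 - start
decreasing_by omega

-- ===== VERDICT (by name: the statement is the Claim_ definition above) =====
theorem gAAAAABmuydMPtls5CUMo4erY_jQ1TheJVFpl8HAqeRri9_rhhWIJrda9Yub4Uvd5f_gKwEQ6IEM95TCD8LOzlPvMlhxft3lIw___spec : Claim_equal_gAAAAABmuydMPtls5CUMo4erY_jQ1TheJVFpl8HAqeRri9_rhhWIJrda9Yub4Uvd5f_gKwEQ6IEM95TCD8LOzlPvMlhxft3lIw__ := by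
  intro text _
  unfold Spec_gAAAAABmuydMPtls5CUMo4erY_jQ1TheJVFpl8HAqeRri9_rhhWIJrda9Yub4Uvd5f_gKwEQ6IEM95TCD8LOzlPvMlhxft3lIw__ gAAAAABmuydMPtls5CUMo4erY_jQ1TheJVFpl8HAqeRri9_rhhWIJrda9Yub4Uvd5f_gKwEQ6IEM95TCD8LOzlPvMlhxft3lIw__ gAAAAABmuydMPtls5CUMo4erY_jQ1TheJVFpl8HAqeRri9_rhhWIJrda9Yub4Uvd5f_gKwEQ6IEM95TCD8LOzlPvMlhxft3lIw___alt
  rw [join_nil_flatten, escGoA_spec]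
  simp
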